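-- pv_equiv track=rewrite | github.com/okara83/Becoming-a-Data-Scientist | Data Science and Machine Learning/Machine-Learning-In-Python-THOROUGH/EXAMPLES/EDABIT/EARLIER/10_fives_and_threes_only.py | only_5_and_3
-- ===== SOURCE A (Python) =====
-- def only_5_and_3(n):
--
--     m3, m5 = [0], []
--     for i in range(1,n+1):
--         if 3**i in range(1,n+1):
--             m3.append(3**i)
--     for j in range(n+1):
--         if j%5==0:
--             m5.append(j)
--
--
--     for p in m3:
--         for r in m5:
--             if (p + r) == n:
--                 return True
--     return False
-- ===== SOURCE B (Python) =====
-- def only_5_and_3(n):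
--     # O(log n): n is representable iff n minus (0 or a power of 3 with exponent >= 1)
--     # is a nonnegative multiple of 5.
--     if n < 0:
--         return False
--     if n % 5 == 0:
--         return True
--     p = 3
--     while p <= n:
--         if (n - p) % 5 == 0:
--             return True
--         p *= 3
--     return False
-- ===== Notes on version B (the rewrite author's own statement) =====
-- stated objective: faster
-- what changed: Instead of materialising the list of powers of 3 and the list of all multiples of 5 up to n and scanning their cross product, B walks the O(log n) powers of 3 (and 0) and tests (n-p) % 5 == 0 directly.
import Mathlib
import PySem

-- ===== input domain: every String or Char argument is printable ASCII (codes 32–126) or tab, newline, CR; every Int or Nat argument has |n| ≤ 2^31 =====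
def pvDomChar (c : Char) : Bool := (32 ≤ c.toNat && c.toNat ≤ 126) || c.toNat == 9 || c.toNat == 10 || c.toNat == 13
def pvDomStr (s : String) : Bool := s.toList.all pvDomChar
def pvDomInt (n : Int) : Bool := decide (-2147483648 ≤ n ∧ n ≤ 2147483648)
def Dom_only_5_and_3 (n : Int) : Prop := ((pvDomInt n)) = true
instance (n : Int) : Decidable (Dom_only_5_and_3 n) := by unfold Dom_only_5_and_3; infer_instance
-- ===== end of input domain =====

-- B replaces A's cross-product scan of a power-of-3 list against a multiples-of-5 list
-- by a direct walk over the powers of 3 testing (n - p) % 5 == 0 (objective: faster).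


-- ===== PORT A =====
-- literal transliteration of A: m3 = [0] plus each 3**i (i = 1..n) lying in range(1, n+1);
-- m5 = multiples of 5 in range(0, n+1); then scan the cross product for p + r == n.
-- (3**i with i ≥ 1 drawn from range(1, n+1) is ported as (3 : Int) ^ i.toNat — exact there;
-- '3**i in range(1, n+1)' is its bounds test 1 ≤ 3**i < n+1.)
def only_5_and_3 (n : Int) : Bool :=
  let m3 : List Int :=
    (PySem.List.pyRange 1 (n + 1) 1).foldl
      (fun acc i =>
        if 1 ≤ (3 : Int) ^ i.toNat ∧ (3 : Int) ^ i.toNat < n + 1 then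
          acc ++ [(3 : Int) ^ i.toNat]
        else acc) [0]
  let m5 : List Int :=
    (PySem.List.pyRange 0 (n + 1) 1).foldl
      (fun acc j => if PySem.Int.mod j 5 = 0 then acc ++ [j] else acc) []
  m3.any (fun p => m5.any (fun r => p + r == n))

-- ===== PORT B =====
-- 'while p <= n: if (n - p) % 5 == 0: return True; p *= 3'
-- (the '0 < p' conjunct only makes the recursion total; p is always a positive power of 3)
def only53AltLoop (n p : Int) : Bool :=
  if h : 0 < p ∧ p ≤ n then
    if PySem.Int.mod (n - p) 5 = 0 then true else only53AltLoop n (p * 3)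
  else false
termination_by (n + 1 - p).toNat
decreasing_by obtain ⟨h1, h2⟩ := h; omega

def only_5_and_3_alt (n : Int) : Bool :=
  if n < 0 then false
  else if PySem.Int.mod n 5 = 0 then true
  else only53AltLoop n 3

-- ===== PRECONDITION & SPEC =====
def Spec_only_5_and_3 (n : Int) (out : Bool) : Prop := out = only_5_and_3_alt n
instance (n : Int) (out : Bool) : Decidable (Spec_only_5_and_3 n out) := by unfold Spec_only_5_and_3; infer_instance

-- ===== CLAIM (what is proved, stated in full; the proofs are below) =====
def Claim_equal_only_5_and_3 : Prop := ∀ (n : Int), Dom_only_5_and_3 n → Spec_only_5_and_3 n (only_5_and_3 n)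

-- ===== LEMMAS AND PROOFS =====

-- common characterisation: n = (0 or a power of 3 with exponent ≥ 1) + a multiple-of-5 remainder
def Rep53 (n : Int) : Prop :=
  (0 ≤ n ∧ PySem.Int.mod n 5 = 0) ∨
    ∃ k : ℕ, 1 ≤ k ∧ (3 : Int) ^ k ≤ n ∧ PySem.Int.mod (n - 3 ^ k) 5 = 0

lemma A_iff (n : Int) : only_5_and_3 n = true ↔ Rep53 n := by
  unfold only_5_and_3
  rw [PySem.List.foldl_append_ite, PySem.List.foldl_append_ite_eq_filter]
  simp only [List.any_eq_true, List.mem_append, List.mem_map,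
    List.mem_filter, PySem.List.mem_pyRange_one, beq_iff_eq, List.mem_cons,
    List.not_mem_nil, or_false, decide_eq_true_eq, List.nil_append]
  constructor
  · rintro ⟨p, hp, r, ⟨⟨hr0, hrn⟩, hr5⟩, hpr⟩
    rcases hp with hp0 | ⟨i, ⟨⟨hi1, hin⟩, h1p, hpn⟩, rfl⟩
    · subst hp0
      left
      have hrn' : r = n := by omega
      exact ⟨by omega, hrn' ▸ hr5⟩
    · right
      refine ⟨i.toNat, ?_, by omega, ?_⟩
      · omega
      · have : n - (3:Int) ^ i.toNat = r := by omega
        rw [this]; exact hr5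
  · rintro (⟨h0, h5⟩ | ⟨k, hk1, hkn, hk5⟩)
    · exact ⟨0, Or.inl rfl, n, ⟨⟨h0, by omega⟩, h5⟩, by ring⟩
    · have hkpos : (1:Int) ≤ 3 ^ k := one_le_pow₀ (by norm_num)
      have hklt : (k : Int) < 3 ^ k := by exact_mod_cast Nat.lt_pow_self (by norm_num) (n := k)
      refine ⟨3 ^ k, Or.inr ⟨(k : Int), ⟨⟨by exact_mod_cast hk1, by omega⟩,
          by simpa using hkpos, by simp only [Int.toNat_natCast]; omega⟩, by simp⟩,
        n - 3 ^ k, ⟨⟨by omega, by omega⟩, hk5⟩, by ring⟩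

lemma altLoop_iff (n p : Int) (hp : 0 < p) :
    only53AltLoop n p = true ↔
      ∃ j : ℕ, p * 3 ^ j ≤ n ∧ PySem.Int.mod (n - p * 3 ^ j) 5 = 0 := by
  refine only53AltLoop.induct n
    (fun p => 0 < p → (only53AltLoop n p = true ↔
      ∃ j : ℕ, p * 3 ^ j ≤ n ∧ PySem.Int.mod (n - p * 3 ^ j) 5 = 0))
    ?_ ?_ ?_ p hp
  · intro p h hm _
    rw [only53AltLoop, dif_pos h, if_pos hm]
    simp only [true_iff]
    exact ⟨0, by simpa using h.2, by simpa using hm⟩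
  · intro p h hm ih hp
    rw [only53AltLoop, dif_pos h, if_neg hm]
    rw [ih (by positivity)]
    constructor
    · rintro ⟨j, hle, hmod⟩
      refine ⟨j + 1, ?_, ?_⟩
      · calc p * 3 ^ (j + 1) = p * 3 * 3 ^ j := by ring
          _ ≤ n := hle
      · have : n - p * 3 ^ (j + 1) = n - p * 3 * 3 ^ j := by ring
        rw [this]; exact hmod
    · rintro ⟨j, hle, hmod⟩
      match j with
      | 0 => exact absurd (by simpa using hmod) hm
      | j + 1 =>
        refine ⟨j, ?_, ?_⟩
        · calc p * 3 * 3 ^ j = p * 3 ^ (j + 1) := by ring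
            _ ≤ n := hle
        · have : n - p * 3 * 3 ^ j = n - p * 3 ^ (j + 1) := by ring
          rw [this]; exact hmod
  · intro p h hp
    rw [only53AltLoop, dif_neg h]
    simp only [Bool.false_eq_true, false_iff]
    rintro ⟨j, hle, _⟩
    have h3 : (1 : Int) ≤ 3 ^ j := one_le_pow₀ (by norm_num)
    have : p ≤ p * 3 ^ j := le_mul_of_one_le_right hp.le h3
    exact h ⟨hp, le_trans this hle⟩

lemma B_iff (n : Int) : only_5_and_3_alt n = true ↔ Rep53 n := by
  unfold only_5_and_3_alt
  split_ifs with h1 h2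
  · simp only [false_iff]
    rintro (⟨h0, _⟩ | ⟨k, _, hkn, _⟩)
    · omega
    · have h3 : (1 : Int) ≤ 3 ^ k := one_le_pow₀ (by norm_num)
      omega
  · simp only [true_iff]
    exact Or.inl ⟨by omega, h2⟩
  · rw [altLoop_iff n 3 (by norm_num)]
    constructor
    · rintro ⟨j, hle, hmod⟩
      refine Or.inr ⟨j + 1, by omega, ?_, ?_⟩
      · calc (3 : Int) ^ (j + 1) = 3 * 3 ^ j := by ring
          _ ≤ n := hle
      · have : n - (3 : Int) ^ (j + 1) = n - 3 * 3 ^ j := by ring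
        rw [this]; exact hmod
    · rintro (⟨_, h5⟩ | ⟨k, hk1, hkn, hk5⟩)
      · exact absurd h5 h2
      · match k, hk1 with
        | k + 1, _ =>
          refine ⟨k, ?_, ?_⟩
          · calc (3 : Int) * 3 ^ k = 3 ^ (k + 1) := by ring
              _ ≤ n := hkn
          · have : n - (3 : Int) * 3 ^ k = n - 3 ^ (k + 1) := by ring
            rw [this]; exact hk5

-- ===== VERDICT (by name: the statement is the Claim_ definition above) =====
theorem only_5_and_3_spec : Claim_equal_only_5_and_3 := by
  intro n _
  unfold Spec_only_5_and_3
  rw [Bool.eq_iff_iff, A_iff, B_iff]
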